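-- pv_equiv track=rewrite | github.com/ISUCT/TProgramming_2024 | codewars/Anagram difference/11.py | anagram_difference
-- ===== SOURCE A (Python) =====
-- from collections import Counter
--
-- def anagram_difference(w1, w2):
--     count1 = Counter(w1)
--     count2 = Counter(w2)
--
--     remove_count = 0
--
--     all_chars = set(count1.keys()).union(set(count2.keys()))
--
--     for char in all_chars:
--         remove_count += abs(count1.get(char, 0) - count2.get(char, 0))
--
--     return remove_count
-- ===== SOURCE B (Python) =====
-- def anagram_difference(w1, w2):
--     s1 = sorted(w1)
--     s2 = sorted(w2)
--     i = j = removed = 0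
--     while i < len(s1) and j < len(s2):
--         if s1[i] == s2[j]:
--             i += 1
--             j += 1
--         elif s1[i] < s2[j]:
--             i += 1
--             removed += 1
--         else:
--             j += 1
--             removed += 1
--     return removed + (len(s1) - i) + (len(s2) - j)
-- ===== Notes on version B (the rewrite author's own statement) =====
-- stated objective: alternative
-- what changed: Drops the Counters entirely: sorts both strings and runs a two-pointer merge scan over the sorted lists, counting every character that fails to pair up with an equal character on the other side.
import Mathlib
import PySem

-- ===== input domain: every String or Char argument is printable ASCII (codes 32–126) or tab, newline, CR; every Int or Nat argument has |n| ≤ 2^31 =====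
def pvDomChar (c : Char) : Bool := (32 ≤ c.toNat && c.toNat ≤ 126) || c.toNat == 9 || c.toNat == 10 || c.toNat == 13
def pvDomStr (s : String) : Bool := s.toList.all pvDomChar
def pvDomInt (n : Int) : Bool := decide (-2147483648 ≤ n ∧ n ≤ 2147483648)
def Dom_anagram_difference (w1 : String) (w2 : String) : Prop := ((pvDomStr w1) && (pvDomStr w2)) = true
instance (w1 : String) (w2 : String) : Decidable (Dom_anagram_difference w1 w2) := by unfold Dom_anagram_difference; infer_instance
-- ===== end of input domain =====

-- B drops the Counters entirely: it sorts both strings and counts unpaired characters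
-- with a two-pointer merge scan (alternative algorithm, same return value).


-- ===== PORT A =====
-- A sums |count1[c] - count2[c]| over the union of the two key sets; the sum of
-- nonnegative terms over a Python set does not depend on iteration order.
def anagram_difference (w1 : String) (w2 : String) : Int :=
  let count1 := PySem.Dict.counter w1.toList
  let count2 := PySem.Dict.counter w2.toList
  let all_chars : PySem.Set Char :=
    PySem.Set.union (PySem.Set.ofList count1.keys) (PySem.Set.ofList count2.keys)
  all_chars.foldl (fun acc c => acc + |count1.getD c 0 - count2.getD c 0|) 0

-- ===== PORT B =====
-- Source B's while loop over indices i, j into the two sorted lists, transcribed as the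
-- obvious structural recursion on the two unconsumed suffixes; `removed` plus the
-- two leftover-length terms of the final return are accumulated in the result.
def mergeDiff : List Char → List Char → Int
  | [], s2 => (s2.length : Int)
  | s1, [] => (s1.length : Int)
  | a :: t1, b :: t2 =>
    if a = b then mergeDiff t1 t2
    else if a < b then 1 + mergeDiff t1 (b :: t2)
    else 1 + mergeDiff (a :: t1) t2

def anagram_difference_alt (w1 : String) (w2 : String) : Int :=
  let s1 := PySem.List.sorted w1.toList (fun c => c) false
  let s2 := PySem.List.sorted w2.toList (fun c => c) false
  mergeDiff s1 s2

-- ===== PRECONDITION & SPEC =====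
def Spec_anagram_difference (w1 : String) (w2 : String) (out : Int) : Prop := out = anagram_difference_alt w1 w2
instance (w1 : String) (w2 : String) (out : Int) : Decidable (Spec_anagram_difference w1 w2 out) := by unfold Spec_anagram_difference; infer_instance

-- ===== CLAIM (what is proved, stated in full; the proofs are below) =====
def Claim_equal_anagram_difference : Prop := ∀ (w1 : String) (w2 : String), Dom_anagram_difference w1 w2 → Spec_anagram_difference w1 w2 (anagram_difference w1 w2)

-- ===== LEMMAS AND PROOFS =====

-- multiset arithmetic for the merge scan
lemma cons_sub_of_not_mem (a : Char) (s t : Multiset Char) (h : a ∉ t) :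
    (a ::ₘ s) - t = a ::ₘ (s - t) := by
  ext c
  simp only [Multiset.count_sub, Multiset.count_cons]
  by_cases hc : c = a
  · subst hc
    rw [Multiset.count_eq_zero_of_notMem h]
    omega
  · simp [hc]

lemma cons_sub_cons' (a : Char) (s t : Multiset Char) : (a ::ₘ s) - (a ::ₘ t) = s - t := by
  rw [Multiset.sub_cons, Multiset.erase_cons_head]

lemma sub_cons_of_not_mem (a : Char) (s t : Multiset Char) (h : a ∉ s) :
    s - (a ::ₘ t) = s - t := by
  rw [Multiset.sub_cons, Multiset.erase_of_notMem h]

-- Both sides of the anagram distance are the cardinality of the two multiset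
-- differences; this characterises the merge scan on sorted lists.
lemma mergeDiff_eq : ∀ (s1 s2 : List Char), s1.Pairwise (· ≤ ·) → s2.Pairwise (· ≤ ·) →
    mergeDiff s1 s2
      = (((s1 : Multiset Char) - (s2 : Multiset Char)).card : Int)
        + (((s2 : Multiset Char) - (s1 : Multiset Char)).card : Int) := by
  intro s1
  induction s1 with
  | nil => intro s2 _ _; simp [mergeDiff]
  | cons a t1 ih1 =>
    intro s2
    induction s2 with
    | nil => intro _ _; simp [mergeDiff]
    | cons b t2 ih2 =>
      intro h1 h2
      have h1t : t1.Pairwise (· ≤ ·) := h1.of_cons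
      have h2t : t2.Pairwise (· ≤ ·) := h2.of_cons
      rcases lt_trichotomy a b with hab | hab | hab
      · -- a < b : a occurs nowhere in b :: t2
        have hnm : a ∉ (((b :: t2 : List Char)) : Multiset Char) := by
          simp only [Multiset.mem_coe, List.mem_cons]
          rintro (rfl | hmem)
          · exact lt_irrefl a hab
          · exact absurd (List.rel_of_pairwise_cons h2 hmem) (not_le.mpr hab)
        have hne : a ≠ b := ne_of_lt hab
        have := ih1 (b :: t2) h1t h2
        simp only [mergeDiff, if_neg hne, if_pos hab, this]
        rw [show ((a :: t1 : List Char) : Multiset Char) = a ::ₘ (t1 : Multiset Char) from rfl,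
          cons_sub_of_not_mem a _ _ hnm, sub_cons_of_not_mem a _ _ hnm]
        push_cast [Multiset.card_cons]
        ring
      · -- a = b : drop one matched pair from each side
        subst hab
        have := ih1 t2 h1t h2t
        simp only [mergeDiff, if_true, this]
        rw [show ((a :: t1 : List Char) : Multiset Char) = a ::ₘ (t1 : Multiset Char) from rfl,
          show ((a :: t2 : List Char) : Multiset Char) = a ::ₘ (t2 : Multiset Char) from rfl,
          cons_sub_cons', cons_sub_cons']
      · -- b < a : b occurs nowhere in a :: t1
        have hnm : b ∉ (((a :: t1 : List Char)) : Multiset Char) := by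
          simp only [Multiset.mem_coe, List.mem_cons]
          rintro (rfl | hmem)
          · exact lt_irrefl b hab
          · exact absurd (List.rel_of_pairwise_cons h1 hmem) (not_le.mpr hab)
        have hne : a ≠ b := (ne_of_lt hab).symm
        have hnlt : ¬ a < b := not_lt.mpr (le_of_lt hab)
        have := ih2 h1 h2t
        simp only [mergeDiff, if_neg hne, if_neg hnlt, this]
        rw [show ((b :: t2 : List Char) : Multiset Char) = b ::ₘ (t2 : Multiset Char) from rfl,
          cons_sub_of_not_mem b _ _ hnm, sub_cons_of_not_mem b _ _ hnm]
        push_cast [Multiset.card_cons]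
        ring

-- the sum, over a nodup list containing the support, of a multiset's counts is its card
lemma sum_counts_over (u : List Char) (m : Multiset Char)
    (hu : u.Nodup) (hsupp : ∀ c ∈ m, c ∈ u) :
    (u.map (fun c => (m.count c : Int))).sum = (m.card : Int) := by
  rw [← List.sum_toFinset _ hu]
  have hsub : m.toFinset ⊆ u.toFinset := by
    intro c hc
    exact List.mem_toFinset.mpr (hsupp c (Multiset.mem_toFinset.mp hc))
  have hz : ∀ c ∈ u.toFinset, c ∉ m.toFinset → ((m.count c : Int)) = 0 := by
    intro c _ hc
    have : c ∉ m := fun h => hc (Multiset.mem_toFinset.mpr h)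
    simp [Multiset.count_eq_zero_of_notMem this]
  rw [← Finset.sum_subset hsub hz]
  have := Multiset.toFinset_sum_count_eq m
  push_cast [← this]
  rfl

theorem anagram_difference_spec : Claim_equal_anagram_difference := by
  intro w1 w2 _
  unfold Spec_anagram_difference anagram_difference anagram_difference_alt
  simp only [PySem.Dict.keys_counter, PySem.Dict.getD_counter, PySem.Set.ofList_ofList,
    PySem.List.foldl_add, zero_add]
  set l1 := w1.toList
  set l2 := w2.toList
  set U : List Char := PySem.Set.union (PySem.Set.ofList l1) (PySem.Set.ofList l2) with hU
  set m1 : Multiset Char := (l1 : Multiset Char) with hm1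
  set m2 : Multiset Char := (l2 : Multiset Char) with hm2
  have hnU : U.Nodup := PySem.Set.nodup_union _ _ (PySem.Set.nodup_ofList l1)
  have hmemU : ∀ x, x ∈ U ↔ x ∈ PySem.Set.ofList l1 ∨ x ∈ PySem.Set.ofList l2 :=
    fun x => PySem.Set.mem_union _ _ x
  -- right-hand side: the merge scan is card (m1 - m2) + card (m2 - m1)
  have hs1 := PySem.List.sorted_pairwise l1 (fun c => c) (κ := Char)
  have hs2 := PySem.List.sorted_pairwise l2 (fun c => c) (κ := Char)
  have hp1 : ((PySem.List.sorted l1 (fun c => c) false : List Char) : Multiset Char) = m1 :=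
    Quot.sound (PySem.List.sorted_perm l1 (fun c => c) false)
  have hp2 : ((PySem.List.sorted l2 (fun c => c) false : List Char) : Multiset Char) = m2 :=
    Quot.sound (PySem.List.sorted_perm l2 (fun c => c) false)
  rw [mergeDiff_eq _ _ hs1 hs2, hp1, hp2]
  -- left-hand side: pointwise |a - b| = count (m1 - m2) + count (m2 - m1)
  have hper : ∀ c : Char, |(l1.count c : Int) - (l2.count c : Int)|
      = ((m1 - m2).count c : Int) + ((m2 - m1).count c : Int) := by
    intro c
    rw [hm1, hm2]
    simp only [Multiset.count_sub, Multiset.coe_count]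
    rcases le_total (l1.count c) (l2.count c) with h | h
    · rw [abs_of_nonpos (by omega)]; omega
    · rw [abs_of_nonneg (by omega)]; omega
  have hsplit : (U.map (fun c => |(l1.count c : Int) - (l2.count c : Int)|)).sum
      = (U.map (fun c => ((m1 - m2).count c : Int))).sum
        + (U.map (fun c => ((m2 - m1).count c : Int))).sum := by
    rw [← List.sum_map_add]
    exact congrArg List.sum (List.map_congr_left (fun c _ => hper c))
  have hsupp1 : ∀ c ∈ m1 - m2, c ∈ U := by
    intro c hc
    have : c ∈ m1 := Multiset.mem_of_le (Multiset.sub_le_self _ _) hc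
    exact (hmemU c).mpr (Or.inl ((PySem.Set.mem_ofList _ _).mpr (Multiset.mem_coe.mp this)))
  have hsupp2 : ∀ c ∈ m2 - m1, c ∈ U := by
    intro c hc
    have : c ∈ m2 := Multiset.mem_of_le (Multiset.sub_le_self _ _) hc
    exact (hmemU c).mpr (Or.inr ((PySem.Set.mem_ofList _ _).mpr (Multiset.mem_coe.mp this)))
  rw [hsplit, sum_counts_over U _ hnU hsupp1, sum_counts_over U _ hnU hsupp2]
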